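-- pv_equiv track=rewrite | github.com/ArindamTripathi619/openbridge | src/openbridge/opencode_bridge.py | _find_section_split_index
-- ===== SOURCE A (Python) =====
-- from typing import Any, Callable, Iterable, List, Mapping, Optional, Set
--
-- def _find_section_split_index(text: str, target: int) -> int:
--     if target <= 0 or target >= len(text):
--         return min(max(target, 0), len(text))
--
--     candidates: List[int] = []
--     for marker in ("\n\n*", "\n\n•", "\n\n- ", "\n\n"):
--         index = text.rfind(marker, 0, target)
--         if index > 100:
--             candidates.append(index + 2)
--
--     if not candidates:
--         return -1
--
--     split = max(candidates)
--     # Do not split in the middle of a fenced code block.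
--     if text[:split].count("```") % 2 != 0:
--         return -1
--     return split
-- ===== SOURCE B (Python) =====
-- def _find_section_split_index(text: str, target: int) -> int:
--     if target <= 0 or target >= len(text):
--         return min(max(target, 0), len(text))
--     # Every marker starts with "\n\n", so the rightmost "\n\n" before `target`
--     # dominates all four candidates; no loop needed.
--     split = text.rfind("\n\n", 0, target)
--     if split <= 100:
--         return -1
--     split += 2
--     if text[:split].count("```") % 2 != 0:
--         return -1
--     return split
-- ===== Notes on version B (the rewrite author's own statement) =====
-- stated objective: simpler
-- what changed: Replaced the four-marker candidate loop plus max() with a single rfind of "\n\n" (which every marker begins with, so its rightmost occurrence dominates all candidates), keeping the guards and the code-fence parity check.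
import Mathlib
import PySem

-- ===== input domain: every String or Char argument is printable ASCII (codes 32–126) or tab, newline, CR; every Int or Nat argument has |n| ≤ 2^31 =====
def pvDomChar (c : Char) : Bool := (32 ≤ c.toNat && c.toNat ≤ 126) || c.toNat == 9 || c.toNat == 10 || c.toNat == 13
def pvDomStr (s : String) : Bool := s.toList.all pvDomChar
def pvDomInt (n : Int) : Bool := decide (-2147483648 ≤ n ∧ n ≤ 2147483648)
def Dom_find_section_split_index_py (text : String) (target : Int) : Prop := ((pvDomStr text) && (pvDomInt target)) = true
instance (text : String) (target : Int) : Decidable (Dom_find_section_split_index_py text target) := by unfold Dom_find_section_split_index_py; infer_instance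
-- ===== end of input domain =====

-- B drops A's four-marker candidate loop: the rightmost "\n\n" before target dominates
-- all four candidates (each marker starts with "\n\n"), so one rfind suffices (simpler).


-- ===== PORT A =====
def find_section_split_index_py (text : String) (target : Int) : Int :=
  if target ≤ 0 ∨ PySem.Str.len text ≤ target then
    min (max target 0) (PySem.Str.len text)
  else
    let candidates : List Int :=
      ["\n\n*", "\n\n•", "\n\n- ", "\n\n"].foldl
        (fun acc marker =>
          let index := PySem.Str.rfindFrom text marker 0 (some target)
          if index > 100 then acc ++ [index + 2] else acc) []
    if candidates = [] then -1
    else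
      match PySem.List.max? candidates (fun y => y) with
      | none => -1  -- unreachable: candidates is nonempty here
      | some split =>
        if PySem.Str.count (PySem.Str.slice text none (some split)) "```" % 2 ≠ 0 then -1
        else split

-- ===== PORT B =====
def find_section_split_index_py_alt (text : String) (target : Int) : Int :=
  if target ≤ 0 ∨ PySem.Str.len text ≤ target then
    min (max target 0) (PySem.Str.len text)
  else
    let split := PySem.Str.rfindFrom text "\n\n" 0 (some target)
    if split ≤ 100 then -1
    else
      let split := split + 2
      if PySem.Str.count (PySem.Str.slice text none (some split)) "```" % 2 ≠ 0 then -1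
      else split

-- ===== PRECONDITION & SPEC =====
def Spec_find_section_split_index_py (text : String) (target : Int) (out : Int) : Prop := out = find_section_split_index_py_alt text target
instance (text : String) (target : Int) (out : Int) : Decidable (Spec_find_section_split_index_py text target out) := by unfold Spec_find_section_split_index_py; infer_instance

-- ===== CLAIM (what is proved, stated in full; the proofs are below) =====
def Claim_equal_find_section_split_index_py : Prop := ∀ (text : String) (target : Int), Dom_find_section_split_index_py text target → Spec_find_section_split_index_py text target (find_section_split_index_py text target)

-- ===== LEMMAS AND PROOFS =====

-- rfind.go is at least -1
theorem rfind_go_ge_neg_one (s sub : List Char) (j : Nat) : -1 ≤ PySem.Chars.rfind.go s sub j := by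
  induction j with
  | zero =>
    simp only [PySem.Chars.rfind.go]
    split
    · omega
    · omega
  | succ j ih =>
    simp only [PySem.Chars.rfind.go]
    split
    · omega
    · exact ih

-- rfind.go is at most its fuel
theorem rfind_go_le (s sub : List Char) (j : Nat) : PySem.Chars.rfind.go s sub j ≤ (j : Int) := by
  induction j with
  | zero =>
    simp only [PySem.Chars.rfind.go]
    split
    · omega
    · omega
  | succ j ih =>
    simp only [PySem.Chars.rfind.go]
    split
    · omega
    · exact ih.trans (by omega)

-- extending the needle can only move the rightmost match left
theorem rfind_go_mono (s sub sub' : List Char) (hp : sub' <+: sub) (j : Nat) :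
    PySem.Chars.rfind.go s sub j ≤ PySem.Chars.rfind.go s sub' j := by
  induction j with
  | zero =>
    simp only [PySem.Chars.rfind.go]
    split
    · rename_i h
      rw [List.isPrefixOf_iff_prefix] at h
      rw [if_pos (by rw [List.isPrefixOf_iff_prefix]; exact hp.trans h)]
    · split
      · omega
      · omega
  | succ j ih =>
    simp only [PySem.Chars.rfind.go]
    split
    · rename_i h
      rw [List.isPrefixOf_iff_prefix] at h
      rw [if_pos (by rw [List.isPrefixOf_iff_prefix]; exact hp.trans h)]
    · split
      · exact (rfind_go_le s sub j).trans (by omega)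
      · exact ih

theorem rfind_mono (s sub sub' : List Char) (hp : sub' <+: sub) :
    PySem.Chars.rfind s sub ≤ PySem.Chars.rfind s sub' := by
  simpa [PySem.Chars.rfind] using rfind_go_mono s sub sub' hp s.length

theorem rfind_ge_neg_one (s sub : List Char) : -1 ≤ PySem.Chars.rfind s sub := by
  simpa [PySem.Chars.rfind] using rfind_go_ge_neg_one s sub s.length

-- the wrapper body of rfindFrom, monotone in the needle
theorem rfindFrom_body_mono (s sub sub' : List Char) (hp : sub' <+: sub) (e st : Int)
    (hst : 0 ≤ st) :
    (if e < st then -1 else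
      if PySem.Chars.rfind s sub = -1 then -1 else st + PySem.Chars.rfind s sub) ≤
    (if e < st then -1 else
      if PySem.Chars.rfind s sub' = -1 then -1 else st + PySem.Chars.rfind s sub') := by
  have hm := rfind_mono s sub sub' hp
  have h1 := rfind_ge_neg_one s sub
  have h2 := rfind_ge_neg_one s sub'
  split_ifs <;> omega

theorem rfindFrom_mono (text m m' : String) (target : Int) (hp : m'.toList <+: m.toList) :
    PySem.Str.rfindFrom text m 0 (some target) ≤ PySem.Str.rfindFrom text m' 0 (some target) := by
  simp only [PySem.Str.rfindFrom_eq, PySem.Chars.rfindFrom]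
  exact rfindFrom_body_mono _ m.toList m'.toList hp _ _ (by split_ifs <;> omega)

-- folding max over elements all ≤ v stays ≤ v
theorem foldl_max_le_of_le (v : Int) (t : List Int) : ∀ (x : Int), x ≤ v → (∀ y ∈ t, y ≤ v) →
    List.foldl max x t ≤ v := by
  induction t with
  | nil => intro x hx _; simpa using hx
  | cons y t ih =>
    intro x hx ht
    simp only [List.foldl]
    exact ih (max x y) (by have := ht y (List.mem_cons_self ..); omega)
      (fun z hz => ht z (List.mem_cons_of_mem _ hz))

-- a dominating last element is Python's max of the candidate list
theorem max?_append_dominating (x : Int) (t : List Int) (v : Int)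
    (ht : ∀ y ∈ t, y ≤ v) (hx : x ≤ v) (hlast : t.getLast? = some v ∨ (t = [] ∧ x = v)) :
    PySem.List.max? (x :: t) (fun y => y) = some v := by
  rw [PySem.List.max?_id_cons]
  rcases hlast with h | ⟨rfl, rfl⟩
  · rcases List.getLast?_eq_some_iff.mp h with ⟨t', rfl⟩
    rw [List.foldl_append]
    simp only [List.foldl]
    have := foldl_max_le_of_le v t' x hx (fun y hy => ht y (List.mem_append_left _ hy))
    exact congrArg some (by omega)
  · simp

-- A's else-branch, once the max of the candidate list is known
theorem Aelse_eq (text : String) (v : Int) (L : List Int)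
    (hL : PySem.List.max? L (fun y => y) = some v) (hne : ¬ L = []) :
    (if L = [] then (-1 : Int) else
      match PySem.List.max? L (fun y => y) with
      | none => -1
      | some split =>
        if PySem.Str.count (PySem.Str.slice text none (some split)) "```" % 2 ≠ 0 then -1
        else split) =
    (if PySem.Str.count (PySem.Str.slice text none (some v)) "```" % 2 ≠ 0 then -1 else v) := by
  rw [if_neg hne, hL]

-- ===== VERDICT (by name: the statement is the Claim_ definition above) =====
theorem find_section_split_index_py_spec : Claim_equal_find_section_split_index_py := by
  unfold Claim_equal_find_section_split_index_py
  intro text target _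
  unfold Spec_find_section_split_index_py find_section_split_index_py find_section_split_index_py_alt
  by_cases hg : target ≤ 0 ∨ PySem.Str.len text ≤ target
  · rw [if_pos hg, if_pos hg]
  · rw [if_neg hg, if_neg hg]
    simp only [List.foldl, List.nil_append]
    have h1 := rfindFrom_mono text "\n\n*" "\n\n" target (by decide)
    have h2 := rfindFrom_mono text "\n\n•" "\n\n" target (by decide)
    have h3 := rfindFrom_mono text "\n\n- " "\n\n" target (by decide)
    by_cases hb : PySem.Str.rfindFrom text "\n\n" 0 (some target) ≤ 100
    · rw [if_neg (show ¬ PySem.Str.rfindFrom text "\n\n*" 0 (some target) > 100 by omega),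
        if_neg (show ¬ PySem.Str.rfindFrom text "\n\n•" 0 (some target) > 100 by omega),
        if_neg (show ¬ PySem.Str.rfindFrom text "\n\n- " 0 (some target) > 100 by omega),
        if_neg (show ¬ PySem.Str.rfindFrom text "\n\n" 0 (some target) > 100 by omega),
        if_pos rfl, if_pos hb]
    · rw [if_pos (show PySem.Str.rfindFrom text "\n\n" 0 (some target) > 100 by omega),
        if_neg hb]
      by_cases c1 : PySem.Str.rfindFrom text "\n\n*" 0 (some target) > 100
      · rw [if_pos c1]
        by_cases c2 : PySem.Str.rfindFrom text "\n\n•" 0 (some target) > 100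
        · rw [if_pos c2]
          by_cases c3 : PySem.Str.rfindFrom text "\n\n- " 0 (some target) > 100
          · rw [if_pos c3]
            have hmx := max?_append_dominating (PySem.Str.rfindFrom text "\n\n*" 0 (some target) + 2)
                [PySem.Str.rfindFrom text "\n\n•" 0 (some target) + 2, PySem.Str.rfindFrom text "\n\n- " 0 (some target) + 2, PySem.Str.rfindFrom text "\n\n" 0 (some target) + 2] (PySem.Str.rfindFrom text "\n\n" 0 (some target) + 2)
                (by intro y hy; simp only [List.mem_cons, List.not_mem_nil, or_false] at hy <;> omega)
                (by omega) (by simp)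
            simp only [List.cons_append, List.nil_append] at hmx ⊢
            rw [Aelse_eq text _ _ hmx (by simp)]
          · rw [if_neg c3]
            have hmx := max?_append_dominating (PySem.Str.rfindFrom text "\n\n*" 0 (some target) + 2)
                [PySem.Str.rfindFrom text "\n\n•" 0 (some target) + 2, PySem.Str.rfindFrom text "\n\n" 0 (some target) + 2] (PySem.Str.rfindFrom text "\n\n" 0 (some target) + 2)
                (by intro y hy; simp only [List.mem_cons, List.not_mem_nil, or_false] at hy <;> omega)
                (by omega) (by simp)
            simp only [List.cons_append, List.nil_append] at hmx ⊢
            rw [Aelse_eq text _ _ hmx (by simp)]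
        · rw [if_neg c2]
          by_cases c3 : PySem.Str.rfindFrom text "\n\n- " 0 (some target) > 100
          · rw [if_pos c3]
            have hmx := max?_append_dominating (PySem.Str.rfindFrom text "\n\n*" 0 (some target) + 2)
                [PySem.Str.rfindFrom text "\n\n- " 0 (some target) + 2, PySem.Str.rfindFrom text "\n\n" 0 (some target) + 2] (PySem.Str.rfindFrom text "\n\n" 0 (some target) + 2)
                (by intro y hy; simp only [List.mem_cons, List.not_mem_nil, or_false] at hy <;> omega)
                (by omega) (by simp)
            simp only [List.cons_append, List.nil_append] at hmx ⊢
            rw [Aelse_eq text _ _ hmx (by simp)]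
          · rw [if_neg c3]
            have hmx := max?_append_dominating (PySem.Str.rfindFrom text "\n\n*" 0 (some target) + 2)
                [PySem.Str.rfindFrom text "\n\n" 0 (some target) + 2] (PySem.Str.rfindFrom text "\n\n" 0 (some target) + 2)
                (by intro y hy; simp only [List.mem_cons, List.not_mem_nil, or_false] at hy <;> omega)
                (by omega) (by simp)
            simp only [List.cons_append, List.nil_append] at hmx ⊢
            rw [Aelse_eq text _ _ hmx (by simp)]
      · rw [if_neg c1]
        by_cases c2 : PySem.Str.rfindFrom text "\n\n•" 0 (some target) > 100
        · rw [if_pos c2]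
          by_cases c3 : PySem.Str.rfindFrom text "\n\n- " 0 (some target) > 100
          · rw [if_pos c3]
            have hmx := max?_append_dominating (PySem.Str.rfindFrom text "\n\n•" 0 (some target) + 2)
                [PySem.Str.rfindFrom text "\n\n- " 0 (some target) + 2, PySem.Str.rfindFrom text "\n\n" 0 (some target) + 2] (PySem.Str.rfindFrom text "\n\n" 0 (some target) + 2)
                (by intro y hy; simp only [List.mem_cons, List.not_mem_nil, or_false] at hy <;> omega)
                (by omega) (by simp)
            simp only [List.cons_append, List.nil_append] at hmx ⊢
            rw [Aelse_eq text _ _ hmx (by simp)]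
          · rw [if_neg c3]
            have hmx := max?_append_dominating (PySem.Str.rfindFrom text "\n\n•" 0 (some target) + 2)
                [PySem.Str.rfindFrom text "\n\n" 0 (some target) + 2] (PySem.Str.rfindFrom text "\n\n" 0 (some target) + 2)
                (by intro y hy; simp only [List.mem_cons, List.not_mem_nil, or_false] at hy <;> omega)
                (by omega) (by simp)
            simp only [List.cons_append, List.nil_append] at hmx ⊢
            rw [Aelse_eq text _ _ hmx (by simp)]
        · rw [if_neg c2]
          by_cases c3 : PySem.Str.rfindFrom text "\n\n- " 0 (some target) > 100
          · rw [if_pos c3]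
            have hmx := max?_append_dominating (PySem.Str.rfindFrom text "\n\n- " 0 (some target) + 2)
                [PySem.Str.rfindFrom text "\n\n" 0 (some target) + 2] (PySem.Str.rfindFrom text "\n\n" 0 (some target) + 2)
                (by intro y hy; simp only [List.mem_cons, List.not_mem_nil, or_false] at hy <;> omega)
                (by omega) (by simp)
            simp only [List.cons_append, List.nil_append] at hmx ⊢
            rw [Aelse_eq text _ _ hmx (by simp)]
          · rw [if_neg c3]
            have hmx := max?_append_dominating (PySem.Str.rfindFrom text "\n\n" 0 (some target) + 2)
                [] (PySem.Str.rfindFrom text "\n\n" 0 (some target) + 2)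
                (by intro y hy; simp only [List.mem_cons, List.not_mem_nil, or_false] at hy <;> omega)
                (by omega) (by simp)
            simp only [List.cons_append, List.nil_append] at hmx ⊢
            rw [Aelse_eq text _ _ hmx (by simp)]
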